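-- pv_equiv track=rewrite | github.com/ebbunnim/Algorithm | 프로그래머스/Level3/최고의집합.py | solution
-- ===== SOURCE A (Python) =====
-- def solution(n, s):
--     if n > s:
--         return [-1]
--     base = s // n
--     result = [base] * n
--     idx = 0
--     for i in range(s - base * n):
--         result[idx] += 1
--         idx += 1
--
--     return sorted(result)
-- ===== SOURCE B (Python) =====
-- def solution(n, s):
--     if n > s:
--         return [-1]
--     out = []
--     while n > 0:
--         q = s // n
--         out.append(q)
--         s -= q
--         n -= 1
--     return out
-- ===== Notes on version B (the rewrite author's own statement) =====
-- stated objective: alternative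
-- what changed: B replaces A's base/remainder construction (fill with s//n, increment the first s-base*n cells, sort) with a greedy single pass that recomputes q = s//n at each step, emits q, and shrinks the problem to (n-1, s-q), producing the parts already in ascending order with no sort.
import Mathlib
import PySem

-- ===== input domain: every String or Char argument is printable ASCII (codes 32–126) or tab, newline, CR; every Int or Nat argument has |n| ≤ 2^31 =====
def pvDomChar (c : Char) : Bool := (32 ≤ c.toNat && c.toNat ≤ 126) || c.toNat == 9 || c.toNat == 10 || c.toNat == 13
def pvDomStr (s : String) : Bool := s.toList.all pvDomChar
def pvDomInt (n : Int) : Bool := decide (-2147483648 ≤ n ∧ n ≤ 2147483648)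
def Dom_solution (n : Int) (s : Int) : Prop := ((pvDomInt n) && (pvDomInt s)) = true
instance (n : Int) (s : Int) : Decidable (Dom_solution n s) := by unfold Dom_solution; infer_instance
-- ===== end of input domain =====

-- B replaces A's fill/increment/sort with a greedy single pass taking s//n per step (already ascending, no sort); alternative algorithm, no speed claim.


-- ===== PORT A =====
def solution (n : Int) (s : Int) : List Int :=
  if n > s then [-1]
  else
    let base := PySem.Int.floordiv s n
    let result := PySem.List.pyRepeat [base] n
    let st := (PySem.List.pyRange 0 (s - base * n) 1).foldl
      (fun (st : List Int × Int) _ =>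
        (PySem.List.pySetD st.1 st.2 (PySem.List.pyGetD st.1 st.2 0 + 1), st.2 + 1))
      (result, 0)
    PySem.List.sorted st.1 (fun x => x) false

-- ===== PORT B =====
-- B's while loop: each of the n.toNat iterations takes s//n, subtracts it from s, decrements n;
-- cons builds the list in the same (append) order as B's out.append.
def solutionAltLoop : Nat → Int → Int → List Int
  | 0, _, _ => []
  | k + 1, n, s =>
    let q := PySem.Int.floordiv s n
    q :: solutionAltLoop k (n - 1) (s - q)

def solution_alt (n : Int) (s : Int) : List Int :=
  if n > s then [-1]
  else solutionAltLoop n.toNat n s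

-- ===== PRECONDITION & SPEC =====
-- Pre_ excludes exactly the inputs (n = 0 with 0 ≤ s) on which A raises ZeroDivisionError.
def Pre_solution (n : Int) (s : Int) : Prop := ¬ (n = 0 ∧ 0 ≤ s)
instance (n : Int) (s : Int) : Decidable (Pre_solution n s) := by unfold Pre_solution; infer_instance
def pvWitness_solution : Int × Int := (3, 10)

def Spec_solution (n : Int) (s : Int) (out : List Int) : Prop := out = solution_alt n s
instance (n : Int) (s : Int) (out : List Int) : Decidable (Spec_solution n s out) := by unfold Spec_solution; infer_instance

-- ===== CLAIM (what is proved, stated in full; the proofs are below) =====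
def Claim_equal_solution : Prop := ∀ (n : Int) (s : Int), Dom_solution n s → Pre_solution n s → Spec_solution n s (solution n s)

-- ===== LEMMAS AND PROOFS =====

-- A's increment loop turns the first k base-cells into (base+1)-cells, one per step.
lemma solution_loop_inv (b : Int) (N : Nat) : ∀ (k j : Nat), j + k ≤ N →
    (PySem.List.pyRange (j : Int) ((j : Int) + (k : Int)) 1).foldl
      (fun (st : List Int × Int) _ =>
        (PySem.List.pySetD st.1 st.2 (PySem.List.pyGetD st.1 st.2 0 + 1), st.2 + 1))
      (List.replicate j (b + 1) ++ List.replicate (N - j) b, (j : Int))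
    = (List.replicate (j + k) (b + 1) ++ List.replicate (N - (j + k)) b, ((j + k : Nat) : Int)) := by
  intro k
  induction k with
  | zero =>
    intro j _
    rw [show ((j : Int) + ((0 : Nat) : Int)) = (j : Int) by push_cast; ring,
      PySem.List.pyRange_one_eq_nil le_rfl]
    simp
  | succ k ih =>
    intro j hjk
    rw [PySem.List.pyRange_one_cons (by omega)]
    have hlt : j < N := by omega
    have hNj : N - j = (N - j - 1) + 1 := by omega
    simp only [List.foldl_cons]
    have hget : PySem.List.pyGetD
        (List.replicate j (b + 1) ++ List.replicate (N - j) b) ((j : Int)) (0 : Int) = b := by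
      have h0 : 0 < N - j := by omega
      rw [PySem.List.pyGetD_natCast, List.getD_eq_getElem?_getD,
        List.getElem?_append_right (by simp)]
      simp [h0]
    have hset : PySem.List.pySetD
        (List.replicate j (b + 1) ++ List.replicate (N - j) b) ((j : Int)) (b + 1)
        = List.replicate (j + 1) (b + 1) ++ List.replicate (N - (j + 1)) b := by
      rw [PySem.List.pySetD_natCast, hNj, List.replicate_succ,
        List.set_append_right _ _ (by simp)]
      simp [List.replicate_succ' (n := j)]
      omega
    have harg : ((j : Int) + 1) = ((j + 1 : Nat) : Int) := by push_cast; ring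
    have harg2 : (j : Int) + ((k + 1 : Nat) : Int) = ((j + 1 : Nat) : Int) + ((k : Nat) : Int) := by
      push_cast; ring
    have hassoc : j + 1 + k = j + (k + 1) := by omega
    rw [hget, hset, harg, harg2, ih (j + 1) (by omega), hassoc]

-- the sorted form of k ones-worth-of-(b+1) after (N-k) b's
lemma sorted_replicates (b : Int) (N k : Nat) :
    PySem.List.sorted (List.replicate k (b + 1) ++ List.replicate (N - k) b) (fun x => x) false
    = List.replicate (N - k) b ++ List.replicate k (b + 1) := by
  apply PySem.List.sorted_id_eq_of_perm_of_pairwise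
  · exact List.perm_append_comm
  · rw [List.pairwise_append]
    refine ⟨List.pairwise_replicate.mpr (by simp), List.pairwise_replicate.mpr (by simp), ?_⟩
    intro x hx y hy
    rw [List.eq_of_mem_replicate hx, List.eq_of_mem_replicate hy]
    omega

-- B's greedy loop yields the closed form: (n - s%n) copies of s//n, then s%n copies of s//n + 1.
lemma altLoop_closed : ∀ (k : Nat) (n s : Int), n.toNat = k → 0 < n →
    solutionAltLoop k n s
    = List.replicate (n - PySem.Int.mod s n).toNat (PySem.Int.floordiv s n)
      ++ List.replicate (PySem.Int.mod s n).toNat (PySem.Int.floordiv s n + 1) := by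
  intro k
  induction k with
  | zero => intro n s hk hn; omega
  | succ k ih =>
    intro n s hk hn
    set q := PySem.Int.floordiv s n with hq
    set r := PySem.Int.mod s n with hr
    have hsum : q * n + r = s := PySem.Int.floordiv_mul_add_mod s n
    have hr0 : 0 ≤ r := PySem.Int.mod_nonneg s hn
    have hrlt : r < n := PySem.Int.mod_lt s hn
    show q :: solutionAltLoop k (n - 1) (s - q) = _
    by_cases h1 : n = 1
    · have hk0 : k = 0 := by omega
      have hr1 : r = 0 := by omega
      subst hk0
      have hnn : n.toNat = 1 := by omega
      simp [solutionAltLoop, hr1, hnn]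
    · have hn1 : 0 < n - 1 := by omega
      have hfd := PySem.Int.floordiv_eq_ediv_of_pos (a := s - q) hn1
      have hmd := PySem.Int.mod_eq_emod_of_pos (a := s - q) hn1
      by_cases hcase : r < n - 1
      · -- remainder fits: same quotient q, same remainder r
        have huniq : (s - q) / (n - 1) = q ∧ (s - q) % (n - 1) = r :=
          (Int.ediv_emod_unique hn1).mpr ⟨by linarith [hsum], hr0, hcase⟩
        rw [ih (n - 1) (s - q) (by omega) hn1, hfd, hmd, huniq.1, huniq.2]
        have hsplit : (n - r).toNat = (n - 1 - r).toNat + 1 := by omega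
        rw [hsplit, List.replicate_succ]
        rfl
      · -- r = n - 1: quotient becomes q + 1, remainder 0
        have hreq : r = n - 1 := by omega
        have huniq : (s - q) / (n - 1) = q + 1 ∧ (s - q) % (n - 1) = 0 :=
          (Int.ediv_emod_unique hn1).mpr ⟨by linarith [hsum], le_refl 0, hn1⟩
        rw [ih (n - 1) (s - q) (by omega) hn1, hfd, hmd, huniq.1, huniq.2]
        have h2 : (n - r).toNat = 1 := by omega
        have h3 : (n - 1 - 0).toNat = r.toNat := by omega
        rw [h2, h3]
        simp

-- ===== VERDICT (by name: the statement is the Claim_ definition above) =====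
theorem solution_spec : Claim_equal_solution := by
  intro n s _ hpre
  unfold Spec_solution solution solution_alt
  by_cases hns : n > s
  · simp [hns]
  · simp only [hns, if_false]
    set b := PySem.Int.floordiv s n with hb
    set r := PySem.Int.mod s n with hr
    have hsum := PySem.Int.floordiv_mul_add_mod s n
    rw [← hb, ← hr] at hsum
    have hrem : s - b * n = r := by omega
    rcases lt_trichotomy n 0 with hneg | hzero | hpos
    · -- n < 0 : empty list on both sides
      have hrle : r ≤ 0 := (PySem.Int.mod_neg_bounds (a := s) hneg).2
      have h1 : PySem.List.pyRepeat [b] n = ([] : List Int) := by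
        rw [PySem.List.pyRepeat_singleton]
        simp [Int.toNat_of_nonpos (le_of_lt hneg)]
      have h2 : PySem.List.pyRange 0 (s - b * n) 1 = [] := by
        rw [hrem]; exact PySem.List.pyRange_one_eq_nil hrle
      have h3 : n.toNat = 0 := by omega
      rw [h1, h2, h3]
      simp [PySem.List.sorted, solutionAltLoop]
    · -- n = 0 : excluded by Pre_ (A divides by zero)
      exact absurd ⟨hzero, by omega⟩ hpre
    · -- n > 0 : both sides equal the closed form
      have hr0 : 0 ≤ r := PySem.Int.mod_nonneg s hpos
      have hrlt : r < n := PySem.Int.mod_lt s hpos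
      have hR : r = ((r.toNat : Nat) : Int) := by omega
      have h1 : PySem.List.pyRepeat [b] n
          = List.replicate 0 (b + 1) ++ List.replicate (n.toNat - 0) b := by
        rw [PySem.List.pyRepeat_singleton]; simp
      have h2 : PySem.List.pyRange 0 (s - b * n) 1
          = PySem.List.pyRange ((0 : Nat) : Int) (((0 : Nat) : Int) + ((r.toNat : Nat) : Int)) 1 := by
        rw [hrem, hR]; norm_num
      rw [h1, h2]
      have hinv := solution_loop_inv b n.toNat r.toNat 0 (by omega)
      simp only [Nat.cast_zero] at hinv ⊢
      rw [hinv]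
      simp only [Nat.zero_add]
      rw [sorted_replicates b n.toNat r.toNat]
      rw [altLoop_closed n.toNat n s rfl hpos, ← hb, ← hr]
      have : (n - r).toNat = n.toNat - r.toNat := by omega
      rw [this]
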